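-- pv_equiv track=rewrite | github.com/checkmarx-ts/cx-supply-chain-toolkit | legacy/enhanced-cxflow-scaresolver/dispatcher/config/ConfigProvider.py | __translate_environment_hostname
-- ===== SOURCE A (Python) =====
-- def __translate_environment_hostname(encoded_hostname):
--     dash_placeholders = encoded_hostname.split("__")
--
--     hostname = "" if len(dash_placeholders) > 0 else encoded_hostname
--
--     for component in dash_placeholders:
--         if len(hostname) > 0:
--             hostname = hostname + "-" + component
--         else:
--             hostname = component
--
--     dot_placeholders = hostname.split("_")
--
--     hostname = "" if len(dot_placeholders) > 0 else hostname
--     for component in dot_placeholders: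
--         if len(hostname) > 0:
--             hostname = hostname + "." + component
--         else:
--             hostname = component
--
--     return hostname
-- ===== SOURCE B (Python) =====
-- def _drop_leading_empty(parts):
--     i = 0
--     while i < len(parts) and parts[i] == "":
--         i += 1
--     return parts[i:]
--
--
-- def __translate_environment_hostname(encoded_hostname):
--     dashed = "-".join(_drop_leading_empty(encoded_hostname.split("__")))
--     return ".".join(_drop_leading_empty(dashed.split("_")))
-- ===== Notes on version B (the rewrite author's own statement) =====
-- stated objective: simpler
-- what changed: Replaces A's two accumulator loops (which rebuild the string component by component, branching on whether the accumulator is still empty) with a drop-leading-empty-then-join decomposition: discard only the leading empty split components, then a single separator-join.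
import Mathlib
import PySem

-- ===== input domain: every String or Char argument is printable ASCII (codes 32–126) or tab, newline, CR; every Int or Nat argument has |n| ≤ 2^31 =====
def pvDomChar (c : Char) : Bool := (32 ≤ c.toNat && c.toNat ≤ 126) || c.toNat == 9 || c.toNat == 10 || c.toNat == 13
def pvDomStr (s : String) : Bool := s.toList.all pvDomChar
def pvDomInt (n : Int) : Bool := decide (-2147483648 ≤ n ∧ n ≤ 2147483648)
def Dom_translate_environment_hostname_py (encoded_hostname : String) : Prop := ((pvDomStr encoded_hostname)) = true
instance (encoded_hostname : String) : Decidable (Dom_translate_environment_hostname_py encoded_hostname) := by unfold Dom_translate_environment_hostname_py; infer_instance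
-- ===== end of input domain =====

-- B replaces A's two accumulator loops by drop-leading-empty-then-join; same return value, simpler decomposition.

-- ===== PORT A =====
-- A's loop body: grow the hostname, inserting the separator only once the accumulator is nonempty.
def pvStepA (sep : List Char) (hostname component : List Char) : List Char :=
  if hostname.length > 0 then hostname ++ sep ++ component else component

def translate_environment_hostname_py (encoded_hostname : String) : String :=
  let enc := encoded_hostname.toList
  let dash_placeholders := PySem.Chars.splitOn enc ['_', '_']
  let hostname0 := if dash_placeholders.length > 0 then [] else enc
  let hostname1 := dash_placeholders.foldl (pvStepA ['-']) hostname0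
  let dot_placeholders := PySem.Chars.splitOn hostname1 ['_']
  let hostname2 := if dot_placeholders.length > 0 then [] else hostname1
  let hostname3 := dot_placeholders.foldl (pvStepA ['.']) hostname2
  String.ofList hostname3

-- ===== PORT B =====
-- Source B's _drop_leading_empty: advance past leading "" components, return the rest.
def pvDropLeadingEmpty (parts : List (List Char)) : List (List Char) :=
  match parts with
  | [] => []
  | p :: rest => if p = [] then pvDropLeadingEmpty rest else p :: rest

def translate_environment_hostname_py_alt (encoded_hostname : String) : String :=
  let dashed := PySem.Chars.join ['-'] (pvDropLeadingEmpty (PySem.Chars.splitOn encoded_hostname.toList ['_', '_']))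
  String.ofList (PySem.Chars.join ['.'] (pvDropLeadingEmpty (PySem.Chars.splitOn dashed ['_'])))

-- ===== PRECONDITION & SPEC =====
def Spec_translate_environment_hostname_py (encoded_hostname : String) (out : String) : Prop := out = translate_environment_hostname_py_alt encoded_hostname
instance (encoded_hostname : String) (out : String) : Decidable (Spec_translate_environment_hostname_py encoded_hostname out) := by unfold Spec_translate_environment_hostname_py; infer_instance

-- ===== CLAIM (what is proved, stated in full; the proofs are below) =====
def Claim_equal_translate_environment_hostname_py : Prop := ∀ (encoded_hostname : String), Dom_translate_environment_hostname_py encoded_hostname → Spec_translate_environment_hostname_py encoded_hostname (translate_environment_hostname_py encoded_hostname)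

-- ===== LEMMAS AND PROOFS =====
theorem pvSplitOnGo_ne_nil (sep : List Char) (fuel : Nat) (l cur : List Char) (acc : List (List Char)) :
    PySem.Chars.splitOn.go sep fuel l cur acc ≠ [] := by
  induction fuel generalizing l cur acc with
  | zero => simp [PySem.Chars.splitOn.go]
  | succ n ih =>
    cases l with
    | nil => simp [PySem.Chars.splitOn.go]
    | cons c rest =>
      simp only [PySem.Chars.splitOn.go]
      split
      · exact ih _ _ _
      · exact ih _ _ _

theorem pvSplitOn_ne_nil (s sep : List Char) : PySem.Chars.splitOn s sep ≠ [] := by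
  simpa [PySem.Chars.splitOn] using pvSplitOnGo_ne_nil sep (s.length + 1) s [] []

theorem pvFoldA_of_ne_nil (sep acc : List Char) (l : List (List Char)) (h : acc ≠ []) :
    l.foldl (pvStepA sep) acc = PySem.Chars.join sep (acc :: l) := by
  induction l generalizing acc with
  | nil => simp [PySem.Chars.join_singleton]
  | cons c rest ih =>
    have hlen : acc.length > 0 := List.length_pos_iff.mpr h
    have hne : acc ++ sep ++ c ≠ [] := by simp [h]
    simp only [List.foldl_cons, pvStepA, if_pos hlen]
    rw [ih _ hne, PySem.Chars.join_cons_cons]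
    cases rest with
    | nil => simp [PySem.Chars.join_singleton]
    | cons d ds => rw [PySem.Chars.join_cons_cons, PySem.Chars.join_cons_cons]; simp

theorem pvFoldA_eq_join_drop (sep : List Char) (l : List (List Char)) :
    l.foldl (pvStepA sep) [] = PySem.Chars.join sep (pvDropLeadingEmpty l) := by
  induction l with
  | nil => simp [pvDropLeadingEmpty, PySem.Chars.join_nil]
  | cons c rest ih =>
    by_cases hc : c = []
    · subst hc
      simpa [pvStepA, pvDropLeadingEmpty] using ih
    · have hlen : ¬ ([] : List Char).length > 0 := by simp
      simp only [List.foldl_cons, pvStepA, if_neg hlen, pvDropLeadingEmpty, if_neg hc]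
      exact pvFoldA_of_ne_nil sep c rest hc

-- ===== VERDICT (by name: the statement is the Claim_ definition above) =====
theorem translate_environment_hostname_py_spec : Claim_equal_translate_environment_hostname_py := by
  intro s _
  unfold Spec_translate_environment_hostname_py translate_environment_hostname_py translate_environment_hostname_py_alt
  simp only
  rw [if_pos (List.length_pos_iff.mpr (pvSplitOn_ne_nil _ _)), pvFoldA_eq_join_drop,
      if_pos (List.length_pos_iff.mpr (pvSplitOn_ne_nil _ _)), pvFoldA_eq_join_drop]
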